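-- pv_equiv track=rewrite | github.com/Snickdx/sellm | app/rag_backend.py | _get_sheet_type
-- ===== SOURCE A (Python) =====
-- def _get_sheet_type(sheet_name: str) -> str:
--     """Categorize sheet type for better search"""
--     sheet_types = {
--         'people': ['Stakeholder', 'Client', 'Role'],
--         'requirements': ['Requirement', 'FunctioFFnal_Requirement', 'Feature'],
--         'planning': ['Goal', 'Timeline', 'Milestone', 'Task'],
--         'constraints': ['Constraint', 'Risk', 'Qual_Scenario'],
--         'budget': ['Budget', 'Line_Item'],
--         'project': ['Project']
--     }
--
--     for type_name, sheets in sheet_types.items():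
--         if sheet_name in sheets:
--             return type_name
--     return 'other'
-- ===== SOURCE B (Python) =====
-- # B: one flat name->type dictionary built once; the category loop and per-category
-- # membership scan are replaced by a single direct lookup.
-- _SHEET_TYPE_LOOKUP = {
--     'Stakeholder': 'people', 'Client': 'people', 'Role': 'people',
--     'Requirement': 'requirements', 'FunctioFFnal_Requirement': 'requirements',
--     'Feature': 'requirements',
--     'Goal': 'planning', 'Timeline': 'planning', 'Milestone': 'planning',
--     'Task': 'planning',
--     'Constraint': 'constraints', 'Risk': 'constraints',
--     'Qual_Scenario': 'constraints',
--     'Budget': 'budget', 'Line_Item': 'budget',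
--     'Project': 'project',
-- }
--
-- def _get_sheet_type(sheet_name: str) -> str:
--     """Categorize sheet type for better search"""
--     return _SHEET_TYPE_LOOKUP.get(sheet_name, 'other')
-- ===== Notes on version B (the rewrite author's own statement) =====
-- stated objective: idiomatic
-- what changed: Replaces the loop over categories with a per-category membership scan by one flat name-to-category dictionary built once at module level and a single dict .get lookup with the default category.
import Mathlib
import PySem

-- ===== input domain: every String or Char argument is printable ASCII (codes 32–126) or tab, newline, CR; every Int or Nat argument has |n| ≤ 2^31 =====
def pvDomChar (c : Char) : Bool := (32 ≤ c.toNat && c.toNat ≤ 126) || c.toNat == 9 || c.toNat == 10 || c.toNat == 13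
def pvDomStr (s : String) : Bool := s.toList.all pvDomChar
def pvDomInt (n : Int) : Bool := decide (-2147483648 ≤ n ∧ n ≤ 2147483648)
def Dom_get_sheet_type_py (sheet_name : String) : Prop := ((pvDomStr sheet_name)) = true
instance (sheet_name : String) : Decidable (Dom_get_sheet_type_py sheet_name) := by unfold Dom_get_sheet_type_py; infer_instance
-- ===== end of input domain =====

-- B replaces A's loop over category lists by a single flat name→category dictionary lookup (idiomatic; same result).


-- ===== PORT A =====
-- the dict literal of A, as an insertion-ordered association list
def pvSheetTypesA : List (String × List String) :=
  [("people", ["Stakeholder", "Client", "Role"]),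
   ("requirements", ["Requirement", "FunctioFFnal_Requirement", "Feature"]),
   ("planning", ["Goal", "Timeline", "Milestone", "Task"]),
   ("constraints", ["Constraint", "Risk", "Qual_Scenario"]),
   ("budget", ["Budget", "Line_Item"]),
   ("project", ["Project"])]

-- the 'for type_name, sheets in sheet_types.items(): if sheet_name in sheets: return type_name' loop
def pvSheetLoopA (sheet_name : String) : List (String × List String) → String
  | [] => "other"
  | (type_name, sheets) :: rest =>
      if sheets.contains sheet_name then type_name else pvSheetLoopA sheet_name rest

def get_sheet_type_py (sheet_name : String) : String :=
  pvSheetLoopA sheet_name pvSheetTypesA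

-- ===== PORT B =====
-- B's flat module-level lookup dict
def pvSheetTypeLookupB : PySem.Dict String String :=
  PySem.Dict.ofList
    [("Stakeholder", "people"), ("Client", "people"), ("Role", "people"),
     ("Requirement", "requirements"), ("FunctioFFnal_Requirement", "requirements"),
     ("Feature", "requirements"),
     ("Goal", "planning"), ("Timeline", "planning"), ("Milestone", "planning"),
     ("Task", "planning"),
     ("Constraint", "constraints"), ("Risk", "constraints"),
     ("Qual_Scenario", "constraints"),
     ("Budget", "budget"), ("Line_Item", "budget"),
     ("Project", "project")]

def get_sheet_type_py_alt (sheet_name : String) : String :=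
  PySem.Dict.getD pvSheetTypeLookupB sheet_name "other"

-- ===== PRECONDITION & SPEC =====
def Spec_get_sheet_type_py (sheet_name : String) (out : String) : Prop := out = get_sheet_type_py_alt sheet_name
instance (sheet_name : String) (out : String) : Decidable (Spec_get_sheet_type_py sheet_name out) := by unfold Spec_get_sheet_type_py; infer_instance

-- ===== CLAIM (what is proved, stated in full; the proofs are below) =====
def Claim_equal_get_sheet_type_py : Prop := ∀ (sheet_name : String), Dom_get_sheet_type_py sheet_name → Spec_get_sheet_type_py sheet_name (get_sheet_type_py sheet_name)

-- ===== LEMMAS AND PROOFS =====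

-- ===== VERDICT (by name: the statement is the Claim_ definition above) =====
theorem get_sheet_type_py_spec : Claim_equal_get_sheet_type_py := by
  intro s _
  unfold Spec_get_sheet_type_py get_sheet_type_py get_sheet_type_py_alt
  have hB : pvSheetTypeLookupB = PySem.Dict.mk
      [("Stakeholder", "people"), ("Client", "people"), ("Role", "people"),
       ("Requirement", "requirements"), ("FunctioFFnal_Requirement", "requirements"),
       ("Feature", "requirements"),
       ("Goal", "planning"), ("Timeline", "planning"), ("Milestone", "planning"),
       ("Task", "planning"),
       ("Constraint", "constraints"), ("Risk", "constraints"),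
       ("Qual_Scenario", "constraints"),
       ("Budget", "budget"), ("Line_Item", "budget"),
       ("Project", "project")] := rfl
  rw [hB]
  simp only [pvSheetTypesA, pvSheetLoopA, List.contains_cons, List.contains_nil]
  split_ifs with h1 h2 h3 h4 h5 h6 <;>
    simp only [Bool.or_eq_true, Bool.or_false, beq_iff_eq, not_or] at *
  · rcases h1 with h | h | h <;> subst h <;> rfl
  · rcases h2 with h | h | h <;> subst h <;> rfl
  · rcases h3 with h | h | h | h <;> subst h <;> rfl
  · rcases h4 with h | h | h <;> subst h <;> rfl
  · rcases h5 with h | h <;> subst h <;> rfl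
  · subst h6; rfl
  · obtain ⟨a1, a2, a3⟩ := h1
    obtain ⟨b1, b2, b3⟩ := h2
    obtain ⟨c1, c2, c3, c4⟩ := h3
    obtain ⟨d1, d2, d3⟩ := h4
    obtain ⟨e1, e2⟩ := h5
    simp [PySem.Dict.getD, PySem.Dict.get?, beq_iff_eq,
      Ne.symm a1, Ne.symm a2, Ne.symm a3, Ne.symm b1, Ne.symm b2, Ne.symm b3,
      Ne.symm c1, Ne.symm c2, Ne.symm c3, Ne.symm c4, Ne.symm d1, Ne.symm d2,
      Ne.symm d3, Ne.symm e1, Ne.symm e2, Ne.symm h6]
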